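-- pv_equiv track=rewrite | github.com/jesselind/metro-tax-lookup | tools/build_arapahoe_parcel_levy_index.py | _dola_column_indices
-- ===== SOURCE A (Python) =====
-- def _dola_column_indices(headers: list[str]) -> tuple[int | None, int | None, int | None, int | None, int | None] | None:
--     """Heuristic column detection for DOLA LGIS exports (xlsx or CSV). Returns None if no name column."""
--     idx_name = None
--     idx_entity = None
--     idx_lgid = None
--     idx_county = None
--     idx_levy = None
--     for i, h in enumerate(headers):
--         hl = h.lower()
--         if idx_name is None and "name" in hl and "tax" in hl:
--             idx_name = i
--         if idx_name is None and hl in ("tax entity name", "entity name", "legal name"):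
--             idx_name = i
--         if idx_entity is None and "tax entity" in hl and "id" in hl:
--             idx_entity = i
--         if idx_lgid is None and ("lgid" in hl.replace(" ", "") or hl == "lg id"):
--             idx_lgid = i
--         if idx_county is None and "certifying" in hl and "county" in hl:
--             idx_county = i
--         if idx_levy is None and "levy" in hl and ("total" in hl or "budget" in hl):
--             idx_levy = i
--
--     if idx_name is None:
--         for i, h in enumerate(headers):
--             if "name" in h.lower() and "county" not in h.lower():
--                 idx_name = i
--                 break
--
--     if idx_name is None:
--         return None
--     return idx_name, idx_entity, idx_lgid, idx_county, idx_levy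
-- ===== SOURCE B (Python) =====
-- def _dola_column_indices(headers: list[str]) -> tuple[int | None, int | None, int | None, int | None, int | None] | None:
--     """Heuristic column detection for DOLA LGIS exports (xlsx or CSV). Returns None if no name column."""
--     def first_index(pred):
--         for i, h in enumerate(headers):
--             if pred(h.lower()):
--                 return i
--         return None
--
--     idx_name = first_index(lambda hl: ("name" in hl and "tax" in hl)
--                            or hl in ("tax entity name", "entity name", "legal name"))
--     if idx_name is None:
--         idx_name = first_index(lambda hl: "name" in hl and "county" not in hl)
--     if idx_name is None:
--         return None
--     return (idx_name,
--             first_index(lambda hl: "tax entity" in hl and "id" in hl),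
--             first_index(lambda hl: "lgid" in hl.replace(" ", "") or hl == "lg id"),
--             first_index(lambda hl: "certifying" in hl and "county" in hl),
--             first_index(lambda hl: "levy" in hl and ("total" in hl or "budget" in hl)))
-- ===== Notes on version B (the rewrite author's own statement) =====
-- stated objective: simpler
-- what changed: Replaced A's single pass that threads five first-match accumulators (plus a separate fallback loop) by a first_index(pred) helper applied once per column predicate, with the name fallback expressed as a lower-priority second call.
import Mathlib
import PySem

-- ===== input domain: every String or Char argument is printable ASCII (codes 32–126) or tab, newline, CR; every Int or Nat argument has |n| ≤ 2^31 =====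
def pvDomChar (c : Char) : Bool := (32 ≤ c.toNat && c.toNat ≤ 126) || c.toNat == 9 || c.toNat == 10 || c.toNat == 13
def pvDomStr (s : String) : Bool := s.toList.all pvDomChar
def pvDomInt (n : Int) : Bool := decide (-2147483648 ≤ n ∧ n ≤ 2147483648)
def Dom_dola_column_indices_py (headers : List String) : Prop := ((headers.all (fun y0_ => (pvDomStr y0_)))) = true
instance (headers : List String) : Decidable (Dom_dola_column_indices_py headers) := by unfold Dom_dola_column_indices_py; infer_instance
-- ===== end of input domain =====

-- B replaces A's single multi-accumulator loop by a first_index(pred) helper applied once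
-- per column (objective: simpler decomposition, same cost).

-- ===== PORT A =====
-- A's main loop: one pass updating five first-match accumulators, branches in source order.
def pvLoopA : List (Int × String) → Option Int → Option Int → Option Int → Option Int → Option Int →
    Option Int × Option Int × Option Int × Option Int × Option Int
  | [], n, e, g, c, v => (n, e, g, c, v)
  | (i, h) :: t, n, e, g, c, v =>
    let hl := PySem.Str.lower h
    let n1 := if n.isNone && (PySem.Str.isIn "name" hl && PySem.Str.isIn "tax" hl) then some i else n
    let n2 := if n1.isNone && (hl == "tax entity name" || hl == "entity name" || hl == "legal name") then some i else n1
    let e' := if e.isNone && (PySem.Str.isIn "tax entity" hl && PySem.Str.isIn "id" hl) then some i else e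
    let g' := if g.isNone && (PySem.Str.isIn "lgid" (PySem.Str.replace hl " " "") || hl == "lg id") then some i else g
    let c' := if c.isNone && (PySem.Str.isIn "certifying" hl && PySem.Str.isIn "county" hl) then some i else c
    let v' := if v.isNone && (PySem.Str.isIn "levy" hl && (PySem.Str.isIn "total" hl || PySem.Str.isIn "budget" hl)) then some i else v
    pvLoopA t n2 e' g' c' v'

-- A's fallback loop: first header containing "name" but not "county" (break on first hit).
def pvLoopAFallback : List (Int × String) → Option Int
  | [] => none
  | (i, h) :: t =>
    if PySem.Str.isIn "name" (PySem.Str.lower h) && !(PySem.Str.isIn "county" (PySem.Str.lower h)) then some i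
    else pvLoopAFallback t

def dola_column_indices_py (headers : List String) : Option (Option Int × Option Int × Option Int × Option Int × Option Int) :=
  let r := pvLoopA (PySem.List.enumerate headers 0) none none none none none
  let n := if r.1.isNone then pvLoopAFallback (PySem.List.enumerate headers 0) else r.1
  if n.isNone then none else some (n, r.2.1, r.2.2.1, r.2.2.2.1, r.2.2.2.2)

-- ===== PORT B =====
-- first_index(pred): first enumerate index whose lowercased header satisfies pred.
def pvFirstIndex (pred : String → Bool) : List (Int × String) → Option Int
  | [] => none
  | (i, h) :: t => if pred (PySem.Str.lower h) then some i else pvFirstIndex pred t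

def pvPredName (hl : String) : Bool :=
  (PySem.Str.isIn "name" hl && PySem.Str.isIn "tax" hl) ||
    (hl == "tax entity name" || hl == "entity name" || hl == "legal name")
def pvPredNameFB (hl : String) : Bool := PySem.Str.isIn "name" hl && !(PySem.Str.isIn "county" hl)
def pvPredEntity (hl : String) : Bool := PySem.Str.isIn "tax entity" hl && PySem.Str.isIn "id" hl
def pvPredLgid (hl : String) : Bool := PySem.Str.isIn "lgid" (PySem.Str.replace hl " " "") || hl == "lg id"
def pvPredCounty (hl : String) : Bool := PySem.Str.isIn "certifying" hl && PySem.Str.isIn "county" hl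
def pvPredLevy (hl : String) : Bool :=
  PySem.Str.isIn "levy" hl && (PySem.Str.isIn "total" hl || PySem.Str.isIn "budget" hl)

def dola_column_indices_py_alt (headers : List String) : Option (Option Int × Option Int × Option Int × Option Int × Option Int) :=
  let en := PySem.List.enumerate headers 0
  let idxName :=
    match pvFirstIndex pvPredName en with
    | some i => some i
    | none => pvFirstIndex pvPredNameFB en
  match idxName with
  | none => none
  | some i =>
      some (some i, pvFirstIndex pvPredEntity en, pvFirstIndex pvPredLgid en,
        pvFirstIndex pvPredCounty en, pvFirstIndex pvPredLevy en)

-- ===== PRECONDITION & SPEC =====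
def Spec_dola_column_indices_py (headers : List String) (out : Option (Option Int × Option Int × Option Int × Option Int × Option Int)) : Prop := out = dola_column_indices_py_alt headers
instance (headers : List String) (out : Option (Option Int × Option Int × Option Int × Option Int × Option Int)) : Decidable (Spec_dola_column_indices_py headers out) := by unfold Spec_dola_column_indices_py; infer_instance

-- ===== CLAIM (what is proved, stated in full; the proofs are below) =====
def Claim_equal_dola_column_indices_py : Prop := ∀ (headers : List String), Dom_dola_column_indices_py headers → Spec_dola_column_indices_py headers (dola_column_indices_py headers)

-- ===== LEMMAS AND PROOFS =====

lemma pvOrStep (x : Option Int) (b : Bool) (i : Int) (r : Option Int) :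
    (if x.isNone && b then some i else x).or r = x.or (if b then some i else r) := by
  cases x <;> cases b <;> simp

lemma pvOrStep2 (x : Option Int) (b1 b2 : Bool) (i : Int) (r : Option Int) :
    (if (if x.isNone && b1 then some i else x).isNone && b2 then some i
     else if x.isNone && b1 then some i else x).or r =
      x.or (if b1 || b2 then some i else r) := by
  cases x <;> cases b1 <;> cases b2 <;> simp

lemma pvLoopA_eq (l : List (Int × String)) (n e g c v : Option Int) :
    pvLoopA l n e g c v =
      (n.or (pvFirstIndex pvPredName l), e.or (pvFirstIndex pvPredEntity l),
       g.or (pvFirstIndex pvPredLgid l), c.or (pvFirstIndex pvPredCounty l),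
       v.or (pvFirstIndex pvPredLevy l)) := by
  induction l generalizing n e g c v with
  | nil => simp [pvLoopA, pvFirstIndex]
  | cons p t ih =>
    obtain ⟨i, h⟩ := p
    simp only [pvLoopA, pvFirstIndex]
    rw [ih]
    simp only [Prod.mk.injEq, pvPredName, pvPredEntity, pvPredLgid, pvPredCounty, pvPredLevy]
    exact ⟨pvOrStep2 _ _ _ _ _, pvOrStep _ _ _ _, pvOrStep _ _ _ _, pvOrStep _ _ _ _,
      pvOrStep _ _ _ _⟩

lemma pvLoopAFallback_eq (l : List (Int × String)) :
    pvLoopAFallback l = pvFirstIndex pvPredNameFB l := by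
  induction l with
  | nil => rfl
  | cons p t ih =>
    obtain ⟨i, h⟩ := p
    simp [pvLoopAFallback, pvFirstIndex, pvPredNameFB, ih]

-- ===== VERDICT (by name: the statement is the Claim_ definition above) =====
theorem dola_column_indices_py_spec : Claim_equal_dola_column_indices_py := by
  intro headers _
  unfold Spec_dola_column_indices_py dola_column_indices_py dola_column_indices_py_alt
  rw [pvLoopA_eq, pvLoopAFallback_eq]
  simp only [Option.none_or]
  cases hN : pvFirstIndex pvPredName (PySem.List.enumerate headers 0) with
  | some i => simp
  | none =>
    simp only [Option.isNone_none, if_true]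
    cases hF : pvFirstIndex pvPredNameFB (PySem.List.enumerate headers 0) <;> simp
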